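-- pv_equiv track=rewrite | github.com/xchxh/glm | openai.py | _find_last_trigger_signal_outside_think
-- ===== SOURCE A (Python) =====
-- def _find_last_trigger_signal_outside_think(text: str, trigger_signal: str) -> int:
--     if not text or not trigger_signal:
--         return -1
--     i = 0
--     depth = 0
--     last = -1
--     while i < len(text):
--         if text.startswith("<think>", i):
--             depth += 1
--             i += 7
--             continue
--         if text.startswith("</think>", i):
--             depth = max(0, depth - 1)
--             i += 8
--             continue
--         if depth == 0 and text.startswith(trigger_signal, i):
--             last = i
--             i += 1
--             continue
--         i += 1
--     return last
-- ===== SOURCE B (Python) =====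
-- def _find_last_trigger_signal_outside_think(text: str, trigger_signal: str) -> int:
--     # Jump between <think>/</think> token events instead of scanning every character.
--     if not text or not trigger_signal:
--         return -1
--     n = len(text)
--     i = 0
--     depth = 0
--     last = -1
--     while i < n:
--         o = text.find("<think>", i)
--         c = text.find("</think>", i)
--         if o == -1:
--             o = n
--         if c == -1:
--             c = n
--         b = min(o, c)
--         if depth == 0:
--             p = text.rfind(trigger_signal, i, b + len(trigger_signal) - 1)
--             if p >= 0:
--                 last = p
--         if b == n:
--             break
--         if b == o:
--             depth += 1
--             i = b + 7
--         else:
--             depth = max(0, depth - 1)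
--             i = b + 8
--     return last
-- ===== Notes on version B (the rewrite author's own statement) =====
-- stated objective: faster
-- what changed: Instead of advancing one character at a time, B jumps directly between <think>/</think> token events (str.find) and recovers the last trigger start inside each depth-0 segment with a single str.rfind over the segment window.
import Mathlib
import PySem

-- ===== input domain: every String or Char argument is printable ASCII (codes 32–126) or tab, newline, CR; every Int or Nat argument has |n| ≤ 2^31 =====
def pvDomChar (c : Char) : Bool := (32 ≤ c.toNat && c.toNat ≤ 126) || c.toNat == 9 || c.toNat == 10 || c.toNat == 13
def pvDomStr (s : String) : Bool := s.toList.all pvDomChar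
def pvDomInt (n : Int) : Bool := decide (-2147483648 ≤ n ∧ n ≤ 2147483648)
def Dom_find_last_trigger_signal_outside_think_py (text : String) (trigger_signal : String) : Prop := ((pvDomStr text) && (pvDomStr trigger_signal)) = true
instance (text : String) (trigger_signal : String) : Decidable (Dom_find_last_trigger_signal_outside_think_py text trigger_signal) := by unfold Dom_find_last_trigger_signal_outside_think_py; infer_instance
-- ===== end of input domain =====

-- B jumps between <think>/</think> token events via find/rfind instead of scanning every character; same result.

def pvThink : List Char := ['<', 't', 'h', 'i', 'n', 'k', '>']
def pvCThink : List Char := ['<', '/', 't', 'h', 'i', 'n', 'k', '>']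

-- ===== PORT A =====
-- literal per-character loop of A; the Nat fuel (≥ remaining length, consumed once per iteration)
-- only makes the recursion structural; text.startswith(sub, i) with 0 ≤ i is exactly `sub <+: cs.drop i`
def goA (cs ts : List Char) : Nat → Nat → Int → Int → Int
  | 0, _i, _depth, last => last
  | fuel + 1, i, depth, last =>
    if i < cs.length then
      if PySem.Chars.startswith (cs.drop i) pvThink then
        goA cs ts fuel (i + 7) (depth + 1) last
      else if PySem.Chars.startswith (cs.drop i) pvCThink then
        goA cs ts fuel (i + 8) (max 0 (depth - 1)) last
      else if depth = 0 ∧ PySem.Chars.startswith (cs.drop i) ts then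
        goA cs ts fuel (i + 1) depth (i : Int)
      else
        goA cs ts fuel (i + 1) depth last
    else last

def find_last_trigger_signal_outside_think_py (text : String) (trigger_signal : String) : Int :=
  if text.toList = [] ∨ trigger_signal.toList = [] then -1
  else goA text.toList trigger_signal.toList text.toList.length 0 0 (-1)

-- ===== PORT B =====
-- B's event-jumping loop (same fuel gadget; every event jump advances the cursor)
def goB (cs ts : List Char) : Nat → Nat → Int → Int → Int
  | 0, _i, _depth, last => last
  | fuel + 1, i, depth, last =>
    if i < cs.length then
      let o := if PySem.Chars.findFrom cs pvThink (i : Int) = -1 then (cs.length : Int) else PySem.Chars.findFrom cs pvThink (i : Int)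
      let c := if PySem.Chars.findFrom cs pvCThink (i : Int) = -1 then (cs.length : Int) else PySem.Chars.findFrom cs pvCThink (i : Int)
      let b := min o c
      let last1 :=
        if depth = 0 then
          let p := PySem.Chars.rfindFrom cs ts (i : Int) (some (b + (ts.length : Int) - 1))
          if 0 ≤ p then p else last
        else last
      if b = (cs.length : Int) then last1
      else if b = o then goB cs ts fuel (b.toNat + 7) (depth + 1) last1
      else goB cs ts fuel (b.toNat + 8) (max 0 (depth - 1)) last1
    else last

def find_last_trigger_signal_outside_think_py_alt (text : String) (trigger_signal : String) : Int :=
  if text.toList = [] ∨ trigger_signal.toList = [] then -1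
  else goB text.toList trigger_signal.toList text.toList.length 0 0 (-1)

-- ===== PRECONDITION & SPEC =====
def Spec_find_last_trigger_signal_outside_think_py (text : String) (trigger_signal : String) (out : Int) : Prop := out = find_last_trigger_signal_outside_think_py_alt text trigger_signal
instance (text : String) (trigger_signal : String) (out : Int) : Decidable (Spec_find_last_trigger_signal_outside_think_py text trigger_signal out) := by unfold Spec_find_last_trigger_signal_outside_think_py; infer_instance

-- ===== CLAIM (what is proved, stated in full; the proofs are below) =====
def Claim_equal_find_last_trigger_signal_outside_think_py : Prop := ∀ (text : String) (trigger_signal : String), Dom_find_last_trigger_signal_outside_think_py text trigger_signal → Spec_find_last_trigger_signal_outside_think_py text trigger_signal (find_last_trigger_signal_outside_think_py text trigger_signal)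

-- ===== LEMMAS AND PROOFS =====

-- a match inside a take-window is a match in the full list that fits in the window
theorem pvPrefixDropTake (s sub : List Char) (p w : Nat) :
    sub <+: (s.take w).drop p ↔ sub <+: s.drop p ∧ sub.length ≤ w - p := by
  rw [List.drop_take, List.prefix_take_iff]

-- rfind.go finds the highest match position ≤ m
theorem pvGoSpec (s sub : List Char) : ∀ m : Nat,
    (PySem.Chars.rfind.go s sub m = -1 ∧ ∀ j, j ≤ m → ¬ sub <+: s.drop j) ∨
    (∃ j : Nat, PySem.Chars.rfind.go s sub m = (j : Int) ∧ j ≤ m ∧ sub <+: s.drop j ∧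
      ∀ j', j < j' → j' ≤ m → ¬ sub <+: s.drop j') := by
  intro m
  induction m with
  | zero =>
      by_cases h : sub.isPrefixOf s
      · right; exact ⟨0, by simp [PySem.Chars.rfind.go, h], le_refl 0,
          by simpa using (List.isPrefixOf_iff_prefix.mp h), by omega⟩
      · left
        refine ⟨by simp [PySem.Chars.rfind.go, h], ?_⟩
        intro j hj
        interval_cases j
        simpa using fun hp => h (List.isPrefixOf_iff_prefix.mpr (by simpa using hp))
  | succ m ih =>
      by_cases h : sub.isPrefixOf (s.drop (m + 1))
      · right
        exact ⟨m + 1, by simp [PySem.Chars.rfind.go, h], le_refl _,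
          List.isPrefixOf_iff_prefix.mp h, by omega⟩
      · have hno : ¬ sub <+: s.drop (m + 1) := fun hp => h (List.isPrefixOf_iff_prefix.mpr hp)
        rcases ih with ⟨he, hn⟩ | ⟨j, he, hjm, hpre, hmax⟩
        · left
          refine ⟨by simp [PySem.Chars.rfind.go, h, he], ?_⟩
          intro j hj
          rcases Nat.lt_or_ge j (m + 1) with hl | hl
          · exact hn j (by omega)
          · have : j = m + 1 := by omega
            subst this; exact hno
        · right
          refine ⟨j, by simp [PySem.Chars.rfind.go, h, he], by omega, hpre, ?_⟩
          intro j' hj hj'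
          rcases Nat.lt_or_ge j' (m + 1) with hl | hl
          · exact hmax j' hj (by omega)
          · have : j' = m + 1 := by omega
            subst this; exact hno

-- "r is the last trigger start in [i, e), or -1 if none" — the value both programs converge on
def pvMaxSpec (cs ts : List Char) (i e : Nat) (r : Int) : Prop :=
  (r = -1 ∧ ∀ p : Nat, i ≤ p → p < e → ¬ ts <+: cs.drop p) ∨
  (∃ p : Nat, r = (p : Int) ∧ i ≤ p ∧ p < e ∧ ts <+: cs.drop p ∧
    ∀ q : Nat, p < q → q < e → ¬ ts <+: cs.drop q)

theorem pvMaxSpec_unique {cs ts : List Char} {i e : Nat} {r r' : Int}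
    (h : pvMaxSpec cs ts i e r) (h' : pvMaxSpec cs ts i e r') : r = r' := by
  rcases h with ⟨he, hn⟩ | ⟨p, he, hip, hpe, hpre, hmax⟩ <;>
    rcases h' with ⟨he', hn'⟩ | ⟨p', he', hip', hpe', hpre', hmax'⟩
  · rw [he, he']
  · exact absurd hpre' (hn p' hip' hpe')
  · exact absurd hpre (hn' p hip hpe)
  · rcases Nat.lt_trichotomy p p' with hl | hl | hl
    · exact absurd hpre' (hmax p' hl hpe')
    · rw [he, he', hl]
    · exact absurd hpre (hmax' p hl hpe)

-- B's rfind over the window [i, b + len(ts) - 1) meets pvMaxSpec for matches starting in [i, b)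
theorem pvRfindFrom_spec (cs ts : List Char) (hts : ts ≠ []) (i e : Nat)
    (hie : i ≤ e) (he : e ≤ cs.length) :
    pvMaxSpec cs ts i e (PySem.Chars.rfindFrom cs ts (i : Int) (some ((e : Int) + (ts.length : Int) - 1))) := by
  have hts1 : 1 ≤ ts.length := List.length_pos_iff.mpr hts
  -- the clamped window end
  unfold PySem.Chars.rfindFrom
  have hE0 : ¬ ((e : Int) + (ts.length : Int) - 1 < 0) := by omega
  have hst : ¬ ((i : Int) < 0) := by omega
  simp only [hE0, hst, if_false]
  set E : Int := if (cs.length : Int) < (e : Int) + (ts.length : Int) - 1 then (cs.length : Int) else (e : Int) + (ts.length : Int) - 1 with hE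
  have hEnn : 0 ≤ E := by rw [hE]; split <;> omega
  have hEle : E ≤ (cs.length : Int) := by rw [hE]; split <;> omega
  have hmatch : ∀ p : Nat, ts <+: cs.drop p → i ≤ p → p < e → (p : Int) + ts.length ≤ E := by
    intro p hp hip hpe
    have := hp.length_le
    rw [List.length_drop] at this
    rw [hE]; split <;> omega
  by_cases hlt : E < (i : Int)
  · -- empty window: no match can start in [i, e)
    rw [if_pos hlt]
    left
    refine ⟨rfl, ?_⟩
    intro p hip hpe hp
    have := hmatch p hp hip hpe
    omega
  · rw [if_neg hlt]
    have hiE : (i : Int) ≤ E := by omega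
    set l : List Char := (cs.take E.toNat).drop (i : Int).toNat with hl
    have hlen : l.length = E.toNat - i := by
      rw [hl]; simp; omega
    have hbridge : ∀ j : Nat, (ts <+: l.drop j ↔ ts <+: cs.drop (i + j) ∧ ts.length ≤ E.toNat - (i + j)) := by
      intro j
      rw [hl]
      have : ((i : Int).toNat) = i := by omega
      rw [this, List.drop_drop]
      exact pvPrefixDropTake cs ts (i + j) E.toNat
    have hfit : ∀ p : Nat, i ≤ p → p < e → ts <+: cs.drop p → (ts <+: l.drop (p - i) ∧ p - i ≤ l.length) := by
      intro p hip hpe hp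
      have hw := hmatch p hp hip hpe
      constructor
      · rw [hbridge (p - i)]
        have : i + (p - i) = p := by omega
        rw [this]
        exact ⟨hp, by omega⟩
      · omega
    rcases pvGoSpec l ts l.length with ⟨he1, hn⟩ | ⟨j, he1, hjm, hpre, hmax⟩
    · rw [PySem.Chars.rfind, he1, if_pos rfl]
      left
      refine ⟨rfl, ?_⟩
      intro p hip hpe hp
      rcases hfit p hip hpe hp with ⟨hp', hle⟩
      exact hn (p - i) hle hp'
    · rw [PySem.Chars.rfind, he1]
      have hne : ¬ ((j : Int) = -1) := by omega
      rw [if_neg hne]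
      right
      rcases (hbridge j).mp hpre with ⟨hcs, hwin⟩
      refine ⟨i + j, by omega, by omega, ?_, hcs, ?_⟩
      · -- i + j < e since the match fits in the window ending at e + |ts| - 1
        have : (i : Int) + j + ts.length ≤ E := by
          have := hpre.length_le
          rw [hE]; rw [hlen] at hjm
          rcases Nat.lt_or_ge ((e : Nat) + ts.length - 1) cs.length with h1 | h1 <;> omega
        rw [hE] at this
        by_contra hcon
        split at this <;> omega
      · intro q hq hqe hqp
        have hiq : i ≤ q := by omega
        rcases hfit q hiq hqe hqp with ⟨hq', hle⟩
        exact hmax (q - i) (by omega) hle hq'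

-- the per-character updates of A over a boundary-free stretch, as a fold
def pvScan (cs ts : List Char) (i m : Nat) (last : Int) : Int :=
  (List.range' i m).foldl (fun l p => if PySem.Chars.startswith (cs.drop p) ts then (p : Int) else l) last

theorem pvScan_spec (cs ts : List Char) (i : Nat) : ∀ m : Nat,
    ∃ r : Int, pvMaxSpec cs ts i (i + m) r ∧
      ∀ last : Int, pvScan cs ts i m last = if 0 ≤ r then r else last := by
  intro m
  induction m with
  | zero =>
      refine ⟨-1, Or.inl ⟨rfl, by omega⟩, ?_⟩
      intro last
      simp [pvScan]
  | succ m ih =>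
      rcases ih with ⟨r, hr, hs⟩
      have hstep : ∀ last, pvScan cs ts i (m + 1) last =
          if PySem.Chars.startswith (cs.drop (i + m)) ts then ((i + m : Nat) : Int)
          else pvScan cs ts i m last := by
        intro last
        rw [pvScan, List.range'_1_concat, List.foldl_append]
        rfl
      by_cases hm : PySem.Chars.startswith (cs.drop (i + m)) ts
      · refine ⟨((i + m : Nat) : Int), Or.inr ⟨i + m, rfl, by omega, by omega,
          (PySem.Chars.startswith_iff _ _).mp hm, by omega⟩, ?_⟩
        intro last
        rw [hstep, if_pos hm, if_pos (by omega)]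
      · have hnm : ¬ ts <+: cs.drop (i + m) := fun hp => hm ((PySem.Chars.startswith_iff _ _).mpr hp)
        refine ⟨r, ?_, ?_⟩
        · rcases hr with ⟨he, hn⟩ | ⟨p, he, hip, hpe, hpre, hmax⟩
          · left
            refine ⟨he, ?_⟩
            intro p hip hpe
            rcases Nat.lt_or_ge p (i + m) with hl | hl
            · exact hn p hip hl
            · have : p = i + m := by omega
              subst this; exact hnm
          · right
            refine ⟨p, he, hip, by omega, hpre, ?_⟩
            intro q hq hqe
            rcases Nat.lt_or_ge q (i + m) with hl | hl
            · exact hmax q hq hl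
            · have : q = i + m := by omega
              subst this; exact hnm
        · intro last
          rw [hstep, if_neg hm, hs]

-- findFrom characterization: -1 with no match at or after i, or the first match position
theorem pvFindFrom_spec' (cs sub : List Char) (hsub : sub ≠ []) (i : Nat) (hi : i ≤ cs.length) :
    (PySem.Chars.findFrom cs sub (i : Int) = -1 ∧ ∀ j : Nat, i ≤ j → ¬ sub <+: cs.drop j) ∨
    (∃ j : Nat, PySem.Chars.findFrom cs sub (i : Int) = (j : Int) ∧ i ≤ j ∧ j < cs.length ∧
      sub <+: cs.drop j ∧ ∀ j' : Nat, i ≤ j' → j' < j → ¬ sub <+: cs.drop j') := by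
  by_cases h : PySem.Chars.findFrom cs sub (i : Int) = -1
  · left
    refine ⟨h, ?_⟩
    intro j hj hp
    have hinf : sub <:+: cs.drop i := by
      rw [← PySem.Chars.isIn_iff_infix, ← PySem.Chars.exists_prefix_drop_iff_isIn]
      refine ⟨j - i, ?_⟩
      rw [List.drop_drop, (by omega : i + (j - i) = j)]
      exact hp
    exact ((PySem.Chars.findFrom_natCast_eq_neg_one_iff cs sub i hi).mp h) hinf
  · right
    rcases PySem.Chars.findFrom_natCast_spec cs sub i hi h with ⟨hge, hpre, hmin⟩
    refine ⟨(PySem.Chars.findFrom cs sub (i : Int)).toNat, by omega, by omega, ?_, hpre, ?_⟩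
    · -- the match position is inside the list since sub ≠ []
      have := hpre.length_le
      rw [List.length_drop] at this
      have : 1 ≤ sub.length := List.length_pos_iff.mpr hsub
      omega
    · intro j' hj' hlt
      exact hmin j' hj' hlt

-- "<think>" and "</think>" cannot both start at the same position
theorem pvNotBoth (l : List Char) : ¬ (pvThink <+: l ∧ pvCThink <+: l) := by
  rintro ⟨h1, h2⟩
  have := List.prefix_of_prefix_length_le h1 h2 (by decide)
  revert this
  decide

-- one unfolded step of goB (the let-bindings written out)
theorem pvGoBStep (cs ts : List Char) (fuel i : Nat) (depth last : Int) (h : i < cs.length) :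
    goB cs ts (fuel + 1) i depth last =
      (if (min (if PySem.Chars.findFrom cs pvThink (i : Int) = -1 then (cs.length : Int) else PySem.Chars.findFrom cs pvThink (i : Int)) (if PySem.Chars.findFrom cs pvCThink (i : Int) = -1 then (cs.length : Int) else PySem.Chars.findFrom cs pvCThink (i : Int))) = (cs.length : Int) then (if depth = 0 then (if 0 ≤ PySem.Chars.rfindFrom cs ts (i : Int) (some ((min (if PySem.Chars.findFrom cs pvThink (i : Int) = -1 then (cs.length : Int) else PySem.Chars.findFrom cs pvThink (i : Int)) (if PySem.Chars.findFrom cs pvCThink (i : Int) = -1 then (cs.length : Int) else PySem.Chars.findFrom cs pvCThink (i : Int))) + (ts.length : Int) - 1)) then PySem.Chars.rfindFrom cs ts (i : Int) (some ((min (if PySem.Chars.findFrom cs pvThink (i : Int) = -1 then (cs.length : Int) else PySem.Chars.findFrom cs pvThink (i : Int)) (if PySem.Chars.findFrom cs pvCThink (i : Int) = -1 then (cs.length : Int) else PySem.Chars.findFrom cs pvCThink (i : Int))) + (ts.length : Int) - 1)) else last) else last)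
      else if (min (if PySem.Chars.findFrom cs pvThink (i : Int) = -1 then (cs.length : Int) else PySem.Chars.findFrom cs pvThink (i : Int)) (if PySem.Chars.findFrom cs pvCThink (i : Int) = -1 then (cs.length : Int) else PySem.Chars.findFrom cs pvCThink (i : Int))) = (if PySem.Chars.findFrom cs pvThink (i : Int) = -1 then (cs.length : Int) else PySem.Chars.findFrom cs pvThink (i : Int)) then goB cs ts fuel ((min (if PySem.Chars.findFrom cs pvThink (i : Int) = -1 then (cs.length : Int) else PySem.Chars.findFrom cs pvThink (i : Int)) (if PySem.Chars.findFrom cs pvCThink (i : Int) = -1 then (cs.length : Int) else PySem.Chars.findFrom cs pvCThink (i : Int))).toNat + 7) (depth + 1) (if depth = 0 then (if 0 ≤ PySem.Chars.rfindFrom cs ts (i : Int) (some ((min (if PySem.Chars.findFrom cs pvThink (i : Int) = -1 then (cs.length : Int) else PySem.Chars.findFrom cs pvThink (i : Int)) (if PySem.Chars.findFrom cs pvCThink (i : Int) = -1 then (cs.length : Int) else PySem.Chars.findFrom cs pvCThink (i : Int))) + (ts.length : Int) - 1)) then PySem.Chars.rfindFrom cs ts (i : Int) (some ((min (if PySem.Chars.findFrom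 cs pvThink (i : Int) = -1 then (cs.length : Int) else PySem.Chars.findFrom cs pvThink (i : Int)) (if PySem.Chars.findFrom cs pvCThink (i : Int) = -1 then (cs.length : Int) else PySem.Chars.findFrom cs pvCThink (i : Int))) + (ts.length : Int) - 1)) else last) else last)
      else goB cs ts fuel ((min (if PySem.Chars.findFrom cs pvThink (i : Int) = -1 then (cs.length : Int) else PySem.Chars.findFrom cs pvThink (i : Int)) (if PySem.Chars.findFrom cs pvCThink (i : Int) = -1 then (cs.length : Int) else PySem.Chars.findFrom cs pvCThink (i : Int))).toNat + 8) (max 0 (depth - 1)) (if depth = 0 then (if 0 ≤ PySem.Chars.rfindFrom cs ts (i : Int) (some ((min (if PySem.Chars.findFrom cs pvThink (i : Int) = -1 then (cs.length : Int) else PySem.Chars.findFrom cs pvThink (i : Int)) (if PySem.Chars.findFrom cs pvCThink (i : Int) = -1 then (cs.length : Int) else PySem.Chars.findFrom cs pvCThink (i : Int))) + (ts.length : Int) - 1)) then PySem.Chars.rfindFrom cs ts (i : Int) (some ((min (if PySem.Chars.findFrom cs pvThink (i : Int) = -1 then (cs.length : Int) else PySem.Chars.findFrom cs pvThink (i : Int))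 (if PySem.Chars.findFrom cs pvCThink (i : Int) = -1 then (cs.length : Int) else PySem.Chars.findFrom cs pvCThink (i : Int))) + (ts.length : Int) - 1)) else last) else last)) := by
  rw [goB, if_pos h]

theorem pvGoAStop (cs ts : List Char) (f i : Nat) (depth last : Int) (h : ¬ i < cs.length) :
    goA cs ts f i depth last = last := by
  cases f <;> simp [goA, h]

theorem pvGoBStop (cs ts : List Char) (f i : Nat) (depth last : Int) (h : ¬ i < cs.length) :
    goB cs ts f i depth last = last := by
  cases f <;> simp [goB, h]

-- A consumes a boundary-free stretch [i, i+m) exactly like one pvScan fold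
theorem pvSegA (cs ts : List Char) : ∀ m f i depth last, i + m ≤ cs.length → cs.length ≤ i + f →
    (∀ j : Nat, i ≤ j → j < i + m → ¬ pvThink <+: cs.drop j ∧ ¬ pvCThink <+: cs.drop j) →
    goA cs ts f i depth last =
      goA cs ts (f - m) (i + m) depth (if depth = 0 then pvScan cs ts i m last else last) := by
  intro m
  induction m with
  | zero =>
      intro f i depth last _ _ _
      simp [pvScan]
  | succ m ih =>
      intro f i depth last hlen hf hno
      have hi : i < cs.length := by omega
      obtain ⟨f', rfl⟩ : ∃ f', f = f' + 1 := ⟨f - 1, by omega⟩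
      have hb := hno i (le_refl i) (by omega)
      have hT : ¬ PySem.Chars.startswith (cs.drop i) pvThink = true := by
        simp [PySem.Chars.startswith_iff]; exact hb.1
      have hC : ¬ PySem.Chars.startswith (cs.drop i) pvCThink = true := by
        simp [PySem.Chars.startswith_iff]; exact hb.2
      have hscan : ∀ last, pvScan cs ts i (m + 1) last =
          pvScan cs ts (i + 1) m (if PySem.Chars.startswith (cs.drop i) ts then (i : Int) else last) := by
        intro last
        rw [pvScan, pvScan, List.range'_succ]
        rfl
      have hno' : ∀ j : Nat, i + 1 ≤ j → j < i + 1 + m → ¬ pvThink <+: cs.drop j ∧ ¬ pvCThink <+: cs.drop j := by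
        intro j h1 h2; exact hno j (by omega) (by omega)
      rw [goA, if_pos hi, if_neg hT, if_neg hC]
      by_cases hd : depth = 0
      · subst hd
        by_cases hts : PySem.Chars.startswith (cs.drop i) ts = true
        · rw [if_pos ⟨rfl, hts⟩, ih f' (i + 1) 0 (i : Int) (by omega) (by omega) hno',
            (by omega : i + 1 + m = i + (m + 1)), (by omega : f' - m = f' + 1 - (m + 1)),
            if_pos rfl, if_pos rfl, hscan, if_pos hts]
        · rw [if_neg (by simp [hts]), ih f' (i + 1) 0 last (by omega) (by omega) hno',
            (by omega : i + 1 + m = i + (m + 1)), (by omega : f' - m = f' + 1 - (m + 1)),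
            if_pos rfl, if_pos rfl, hscan, if_neg hts]
      · rw [if_neg (by simp [hd]), ih f' (i + 1) depth last (by omega) (by omega) hno',
          (by omega : i + 1 + m = i + (m + 1)), (by omega : f' - m = f' + 1 - (m + 1)),
          if_neg hd, if_neg hd]

-- the fold of A's per-character updates over [i, e) equals B's one windowed rfind
theorem pvScanEq (cs ts : List Char) (hts : ts ≠ []) (i e : Nat) (hie : i ≤ e) (he : e ≤ cs.length) (last : Int) :
    pvScan cs ts i (e - i) last =
      (if 0 ≤ PySem.Chars.rfindFrom cs ts (i : Int) (some ((e : Int) + (ts.length : Int) - 1)) then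
        PySem.Chars.rfindFrom cs ts (i : Int) (some ((e : Int) + (ts.length : Int) - 1)) else last) := by
  rcases pvScan_spec cs ts i (e - i) with ⟨r, hr, hs⟩
  rw [(by omega : i + (e - i) = e)] at hr
  rw [hs, pvMaxSpec_unique hr (pvRfindFrom_spec cs ts hts i e hie he)]

-- main equivalence: A with char-fuel kA equals B with event-fuel kB, both sufficient
theorem pvMain (cs ts : List Char) (hts : ts ≠ []) : ∀ kB kA i depth last,
    cs.length ≤ i + kA → cs.length ≤ i + kB →
    goA cs ts kA i depth last = goB cs ts kB i depth last := by
  intro kB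
  induction kB with
  | zero =>
      intro kA i depth last hA hB
      rw [pvGoAStop cs ts kA i depth last (by omega), pvGoBStop cs ts 0 i depth last (by omega)]
  | succ kB ih =>
      intro kA i depth last hA hB
      by_cases hi : i < cs.length
      · -- characterize the two find results
        rcases pvFindFrom_spec' cs pvThink (by decide) i hi.le with ⟨hoe, hnoT⟩ | ⟨jo, hoe, hijo, hjol, hToJ, hminT⟩ <;>
          rcases pvFindFrom_spec' cs pvCThink (by decide) i hi.le with ⟨hce, hnoC⟩ | ⟨jc, hce, hijc, hjcl, hCoJ, hminC⟩
        · -- no boundary at all: segment runs to the end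
          rw [pvGoBStep cs ts kB i depth last hi, if_pos hoe, if_pos hce, min_self, if_pos rfl]
          have hno : ∀ j : Nat, i ≤ j → j < i + (cs.length - i) → ¬ pvThink <+: cs.drop j ∧ ¬ pvCThink <+: cs.drop j :=
            fun j h1 _ => ⟨hnoT j h1, hnoC j h1⟩
          rw [pvSegA cs ts (cs.length - i) kA i depth last (by omega) (by omega) hno,
            (by omega : i + (cs.length - i) = cs.length),
            pvGoAStop cs ts (kA - (cs.length - i)) cs.length depth _ (lt_irrefl cs.length)]
          by_cases hd : depth = 0
          · rw [if_pos hd, if_pos hd, pvScanEq cs ts hts i cs.length hi.le (le_refl _) last]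
          · rw [if_neg hd, if_neg hd]
        · -- only a close token ahead, at jc
          rw [pvGoBStep cs ts kB i depth last hi, if_pos hoe,
            if_neg (show ¬ PySem.Chars.findFrom cs pvCThink (i : Int) = -1 by rw [hce]; omega), hce]
          rw [(by omega : min ((cs.length : Nat) : Int) ((jc : Nat) : Int) = ((jc : Nat) : Int))]
          rw [if_neg (show ¬ ((jc : Nat) : Int) = ((cs.length : Nat) : Int) by omega)]
          rw [if_neg (show ¬ ((jc : Nat) : Int) = ((cs.length : Nat) : Int) by omega)]
          rw [(by omega : (((jc : Nat) : Int)).toNat = jc)]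
          have hno : ∀ j : Nat, i ≤ j → j < i + (jc - i) → ¬ pvThink <+: cs.drop j ∧ ¬ pvCThink <+: cs.drop j :=
            fun j h1 h2 => ⟨hnoT j h1, hminC j h1 (by omega)⟩
          rw [pvSegA cs ts (jc - i) kA i depth last (by omega) (by omega) hno, (by omega : i + (jc - i) = jc)]
          obtain ⟨f', hf'⟩ : ∃ f', kA - (jc - i) = f' + 1 := ⟨kA - (jc - i) - 1, by omega⟩
          rw [hf', goA, if_pos hjcl]
          rw [if_neg (show ¬ PySem.Chars.startswith (cs.drop jc) pvThink = true by
            simp only [PySem.Chars.startswith_iff]; exact hnoT jc (by omega))]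
          rw [if_pos ((PySem.Chars.startswith_iff _ _).mpr hCoJ)]
          rw [ih f' (jc + 8) (max 0 (depth - 1)) (if depth = 0 then pvScan cs ts i (jc - i) last else last) (by omega) (by omega)]
          congr 1
          by_cases hd : depth = 0
          · rw [if_pos hd, if_pos hd, pvScanEq cs ts hts i jc (by omega) (by omega) last]
          · rw [if_neg hd, if_neg hd]
        · -- only an open token ahead, at jo
          rw [pvGoBStep cs ts kB i depth last hi,
            if_neg (show ¬ PySem.Chars.findFrom cs pvThink (i : Int) = -1 by rw [hoe]; omega), if_pos hce, hoe]
          rw [(by omega : min ((jo : Nat) : Int) ((cs.length : Nat) : Int) = ((jo : Nat) : Int))]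
          rw [if_neg (show ¬ ((jo : Nat) : Int) = ((cs.length : Nat) : Int) by omega)]
          rw [if_pos rfl]
          rw [(by omega : (((jo : Nat) : Int)).toNat = jo)]
          have hno : ∀ j : Nat, i ≤ j → j < i + (jo - i) → ¬ pvThink <+: cs.drop j ∧ ¬ pvCThink <+: cs.drop j :=
            fun j h1 h2 => ⟨hminT j h1 (by omega), hnoC j h1⟩
          rw [pvSegA cs ts (jo - i) kA i depth last (by omega) (by omega) hno, (by omega : i + (jo - i) = jo)]
          obtain ⟨f', hf'⟩ : ∃ f', kA - (jo - i) = f' + 1 := ⟨kA - (jo - i) - 1, by omega⟩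
          rw [hf', goA, if_pos hjol]
          rw [if_pos ((PySem.Chars.startswith_iff _ _).mpr hToJ)]
          rw [ih f' (jo + 7) (depth + 1) (if depth = 0 then pvScan cs ts i (jo - i) last else last) (by omega) (by omega)]
          congr 1
          by_cases hd : depth = 0
          · rw [if_pos hd, if_pos hd, pvScanEq cs ts hts i jo (by omega) (by omega) last]
          · rw [if_neg hd, if_neg hd]
        · -- both tokens ahead: the earlier one is the event
          rw [pvGoBStep cs ts kB i depth last hi,
            if_neg (show ¬ PySem.Chars.findFrom cs pvThink (i : Int) = -1 by rw [hoe]; omega),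
            if_neg (show ¬ PySem.Chars.findFrom cs pvCThink (i : Int) = -1 by rw [hce]; omega), hoe, hce]
          rcases Nat.lt_trichotomy jo jc with hlt | heq | hgt
          · -- open token first
            rw [(by omega : min ((jo : Nat) : Int) ((jc : Nat) : Int) = ((jo : Nat) : Int))]
            rw [if_neg (show ¬ ((jo : Nat) : Int) = ((cs.length : Nat) : Int) by omega)]
            rw [if_pos rfl]
            rw [(by omega : (((jo : Nat) : Int)).toNat = jo)]
            have hno : ∀ j : Nat, i ≤ j → j < i + (jo - i) → ¬ pvThink <+: cs.drop j ∧ ¬ pvCThink <+: cs.drop j :=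
              fun j h1 h2 => ⟨hminT j h1 (by omega), hminC j h1 (by omega)⟩
            rw [pvSegA cs ts (jo - i) kA i depth last (by omega) (by omega) hno, (by omega : i + (jo - i) = jo)]
            obtain ⟨f', hf'⟩ : ∃ f', kA - (jo - i) = f' + 1 := ⟨kA - (jo - i) - 1, by omega⟩
            rw [hf', goA, if_pos hjol]
            rw [if_pos ((PySem.Chars.startswith_iff _ _).mpr hToJ)]
            rw [ih f' (jo + 7) (depth + 1) (if depth = 0 then pvScan cs ts i (jo - i) last else last) (by omega) (by omega)]
            congr 1
            by_cases hd : depth = 0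
            · rw [if_pos hd, if_pos hd, pvScanEq cs ts hts i jo (by omega) (by omega) last]
            · rw [if_neg hd, if_neg hd]
          · exact absurd ⟨hToJ, heq ▸ hCoJ⟩ (pvNotBoth (cs.drop jo))
          · -- close token first
            rw [(by omega : min ((jo : Nat) : Int) ((jc : Nat) : Int) = ((jc : Nat) : Int))]
            rw [if_neg (show ¬ ((jc : Nat) : Int) = ((cs.length : Nat) : Int) by omega)]
            rw [if_neg (show ¬ ((jc : Nat) : Int) = ((jo : Nat) : Int) by omega)]
            rw [(by omega : (((jc : Nat) : Int)).toNat = jc)]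
            have hno : ∀ j : Nat, i ≤ j → j < i + (jc - i) → ¬ pvThink <+: cs.drop j ∧ ¬ pvCThink <+: cs.drop j :=
              fun j h1 h2 => ⟨hminT j h1 (by omega), hminC j h1 (by omega)⟩
            rw [pvSegA cs ts (jc - i) kA i depth last (by omega) (by omega) hno, (by omega : i + (jc - i) = jc)]
            obtain ⟨f', hf'⟩ : ∃ f', kA - (jc - i) = f' + 1 := ⟨kA - (jc - i) - 1, by omega⟩
            rw [hf', goA, if_pos hjcl]
            rw [if_neg (show ¬ PySem.Chars.startswith (cs.drop jc) pvThink = true by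
              simp only [PySem.Chars.startswith_iff]; exact hminT jc (by omega) (by omega))]
            rw [if_pos ((PySem.Chars.startswith_iff _ _).mpr hCoJ)]
            rw [ih f' (jc + 8) (max 0 (depth - 1)) (if depth = 0 then pvScan cs ts i (jc - i) last else last) (by omega) (by omega)]
            congr 1
            by_cases hd : depth = 0
            · rw [if_pos hd, if_pos hd, pvScanEq cs ts hts i jc (by omega) (by omega) last]
            · rw [if_neg hd, if_neg hd]
      · rw [pvGoAStop cs ts kA i depth last hi, pvGoBStop cs ts (kB + 1) i depth last hi]

-- ===== VERDICT (by name: the statement is the Claim_ definition above) =====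
theorem find_last_trigger_signal_outside_think_py_spec : Claim_equal_find_last_trigger_signal_outside_think_py := by
  intro text trigger_signal _dom
  unfold Spec_find_last_trigger_signal_outside_think_py
  unfold find_last_trigger_signal_outside_think_py find_last_trigger_signal_outside_think_py_alt
  by_cases hg : text.toList = [] ∨ trigger_signal.toList = []
  · rw [if_pos hg, if_pos hg]
  · rw [if_neg hg, if_neg hg]
    exact pvMain text.toList trigger_signal.toList (not_or.mp hg).2 text.toList.length text.toList.length 0 0 (-1) (by omega) (by omega)
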